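-- pv_equiv track=rewrite | github.com/AleksOfficial/Codecademy | Advent_of_Code/Advent_of_Code_2020/Day10/day10.py | recursive_approach
-- ===== SOURCE A (Python) =====
-- def recursive_approach(array,val,target):
--   total = 0
--   if val == target:
--     return 1
--   if(val-1 in array):
--     total+=recursive_approach(array,val-1,target)
--   if(val-2 in array):
--     total += recursive_approach(array,val-2,target)
--   if(val-3 in array):
--     total += recursive_approach(array,val-3,target)
--   return total
-- ===== SOURCE B (Python) =====
-- def recursive_approach(array, val, target):
--     # Bottom-up DP over the sorted distinct relevant values: each value's count computed once.
--     s = set(array)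
--     d = {}
--     for u in sorted(s | {val, target}):
--         if u == target:
--             d[u] = 1
--         else:
--             d[u] = sum(d.get(u - k, 0) for k in (1, 2, 3) if (u - k) in s)
--     return d[val]
-- ===== Notes on version B (the rewrite author's own statement) =====
-- stated objective: alternative
-- what changed: Replaces the three-way top-down recursion with a bottom-up dynamic program over the sorted distinct values (a dict of path counts filled in increasing order), so each value's count is computed once.
import Mathlib
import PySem

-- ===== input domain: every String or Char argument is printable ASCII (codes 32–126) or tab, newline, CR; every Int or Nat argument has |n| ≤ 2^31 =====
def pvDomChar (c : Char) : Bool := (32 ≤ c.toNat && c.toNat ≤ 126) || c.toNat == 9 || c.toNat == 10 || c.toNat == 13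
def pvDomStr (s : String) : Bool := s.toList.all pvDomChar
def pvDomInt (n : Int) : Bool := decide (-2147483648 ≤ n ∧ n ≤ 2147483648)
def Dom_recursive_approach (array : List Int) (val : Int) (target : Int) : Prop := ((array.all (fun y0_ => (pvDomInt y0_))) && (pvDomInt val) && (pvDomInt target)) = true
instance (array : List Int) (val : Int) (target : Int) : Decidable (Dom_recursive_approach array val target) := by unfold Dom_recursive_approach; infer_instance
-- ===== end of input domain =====

-- B replaces A's exponential three-way recursion with a bottom-up DP over the sorted distinct
-- values, computing each value's count once (objective: alternative).

-- ===== PORT A =====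
-- termination measure: each recursive call goes to a strictly smaller value that is IN the list,
-- so the number of list elements below the current value strictly decreases
theorem pvFilterLt_strict (l : List Int) (a b : Int) (ha : a ∈ l) (hab : a < b) :
    (l.filter (fun x => decide (x < a))).length < (l.filter (fun x => decide (x < b))).length := by
  have hsub : (l.filter (fun x => decide (x < a))).Sublist (l.filter (fun x => decide (x < b))) := by
    apply List.monotone_filter_right
    intro x hx
    simp only [decide_eq_true_eq] at *
    omega
  rcases lt_or_eq_of_le hsub.length_le with h | h
  · exact h
  · exfalso
    have heq := hsub.eq_of_length h
    have hmem : a ∈ l.filter (fun x => decide (x < b)) :=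
      List.mem_filter.2 ⟨ha, by simpa using hab⟩
    rw [← heq] at hmem
    have := (List.mem_filter.1 hmem).2
    simp at this

def recursive_approach (array : List Int) (val : Int) (target : Int) : Int :=
  if val = target then 1
  else
    let total : Int := 0
    let total := if val - 1 ∈ array then total + recursive_approach array (val - 1) target else total
    let total := if val - 2 ∈ array then total + recursive_approach array (val - 2) target else total
    let total := if val - 3 ∈ array then total + recursive_approach array (val - 3) target else total
    total
termination_by (array.filter (fun x => decide (x < val))).length
decreasing_by
  · exact pvFilterLt_strict array (val - 1) val (by assumption) (by omega)
  · exact pvFilterLt_strict array (val - 2) val (by assumption) (by omega)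
  · exact pvFilterLt_strict array (val - 3) val (by assumption) (by omega)

-- ===== PORT B =====
def recursive_approach_alt (array : List Int) (val : Int) (target : Int) : Int :=
  let s : PySem.Set Int := PySem.Set.ofList array
  let keys := PySem.List.sorted (PySem.Set.union s [val, target]) (fun x => x) false
  let d :=
    keys.foldl
      (fun (d : PySem.Dict Int Int) u =>
        if u = target then d.insert u 1
        else
          d.insert u
            ((if u - 1 ∈ s then d.getD (u - 1) 0 else 0) +
             (if u - 2 ∈ s then d.getD (u - 2) 0 else 0) +
             (if u - 3 ∈ s then d.getD (u - 3) 0 else 0)))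
      PySem.Dict.empty
  -- Python's d[val]: val is always a key of d (it is in keys), so this never raises
  d.getD val 0

-- ===== PRECONDITION & SPEC =====
def Spec_recursive_approach (array : List Int) (val : Int) (target : Int) (out : Int) : Prop := out = recursive_approach_alt array val target
instance (array : List Int) (val : Int) (target : Int) (out : Int) : Decidable (Spec_recursive_approach array val target out) := by unfold Spec_recursive_approach; infer_instance

-- ===== CLAIM (what is proved, stated in full; the proofs are below) =====
def Claim_equal_recursive_approach : Prop := ∀ (array : List Int) (val : Int) (target : Int), Dom_recursive_approach array val target → Spec_recursive_approach array val target (recursive_approach array val target)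

-- ===== LEMMAS AND PROOFS =====

-- A's recursion unfolded for val ≠ target, with the accumulator chain flattened to a sum
theorem recursive_approach_ne (array : List Int) (val target : Int) (h : val ≠ target) :
    recursive_approach array val target =
      (if val - 1 ∈ array then recursive_approach array (val - 1) target else 0) +
      (if val - 2 ∈ array then recursive_approach array (val - 2) target else 0) +
      (if val - 3 ∈ array then recursive_approach array (val - 3) target else 0) := by
  rw [recursive_approach]
  simp only [h, if_false]
  split_ifs <;> ring

-- the fold's step function
def pvStep (array : List Int) (target : Int) (d : PySem.Dict Int Int) (u : Int) : PySem.Dict Int Int :=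
  if u = target then d.insert u 1
  else
    d.insert u
      ((if u - 1 ∈ PySem.Set.ofList array then d.getD (u - 1) 0 else 0) +
       (if u - 2 ∈ PySem.Set.ofList array then d.getD (u - 2) 0 else 0) +
       (if u - 3 ∈ PySem.Set.ofList array then d.getD (u - 3) 0 else 0))

-- invariant: processing the rest of a strictly increasing key list that covers the array
-- extends a dict that is correct on the processed prefix to one correct everywhere
theorem pvFold_inv (array : List Int) (target : Int) :
    ∀ (rest done : List Int) (d : PySem.Dict Int Int),
      (∀ x ∈ array, x ∈ done ++ rest) →
      (done ++ rest).Pairwise (· < ·) →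
      (∀ x ∈ done, d.getD x 0 = recursive_approach array x target) →
      ∀ x ∈ done ++ rest,
        (rest.foldl (pvStep array target) d).getD x 0 = recursive_approach array x target := by
  intro rest
  induction rest with
  | nil =>
    intro done d _ _ hd x hx
    simpa using hd x (by simpa using hx)
  | cons u rest' ih =>
    intro done d hsub hpw hd x hx
    have hlt_done : ∀ y ∈ done, y < u := by
      intro y hy
      exact (List.pairwise_append.1 hpw).2.2 y hy u (by simp)
    have hgt_rest : ∀ y ∈ rest', u < y := by
      have := (List.pairwise_append.1 hpw).2.1
      exact fun y hy => (List.pairwise_cons.1 this).1 y hy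
    -- correctness of the value written for u
    have hval : (pvStep array target d u).getD u 0 = recursive_approach array u target := by
      unfold pvStep
      by_cases hu : u = target
      · simp [hu, PySem.Dict.getD_insert_self, recursive_approach]
      · rw [if_neg hu, PySem.Dict.getD_insert_self, recursive_approach_ne array u target hu]
        have harg : ∀ k : Int, 0 < k → u - k ∈ array →
            d.getD (u - k) 0 = recursive_approach array (u - k) target := by
          intro k hk hmem
          apply hd
          have hin : u - k ∈ done ++ u :: rest' := hsub _ hmem
          rcases List.mem_append.1 hin with h | h
          · exact h
          · rcases List.mem_cons.1 h with h | h
            · omega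
            · exact absurd (hgt_rest _ h) (by omega)
        by_cases h1 : u - 1 ∈ array <;> by_cases h2 : u - 2 ∈ array <;> by_cases h3 : u - 3 ∈ array <;>
          simp [PySem.Set.mem_ofList, h1, h2, h3,
            harg 1 (by omega), harg 2 (by omega), harg 3 (by omega)]
    -- the new dict is correct on done ++ [u]
    have hd' : ∀ x ∈ done ++ [u],
        (pvStep array target d u).getD x 0 = recursive_approach array x target := by
      intro x hx
      rcases List.mem_append.1 hx with h | h
      · have hne : x ≠ u := by have := hlt_done x h; omega
        unfold pvStep
        split_ifs <;> rw [PySem.Dict.getD_insert_of_ne (hne := hne)] <;> exact hd x h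
      · simp only [List.mem_singleton] at h
        subst h; exact hval
    have happ : done ++ u :: rest' = (done ++ [u]) ++ rest' := by simp
    rw [List.foldl_cons]
    exact ih (done ++ [u]) (pvStep array target d u)
      (by intro y hy; rw [← happ]; exact hsub y hy)
      (by rw [← happ]; exact hpw)
      hd' x (by rw [← happ]; exact hx)

-- ===== VERDICT (by name: the statement is the Claim_ definition above) =====
theorem recursive_approach_spec : Claim_equal_recursive_approach := by
  intro array val target _
  unfold Spec_recursive_approach recursive_approach_alt
  simp only []
  set s := PySem.Set.ofList array with hs
  set keys := PySem.List.sorted (PySem.Set.union s [val, target]) (fun x => x) false with hk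
  have hperm : keys.Perm (PySem.Set.union s [val, target]) := PySem.List.sorted_perm _ _ _
  have hnodup : keys.Nodup := hperm.nodup_iff.2 (PySem.Set.nodup_union _ _ (PySem.Set.nodup_ofList array))
  have hpw : keys.Pairwise (· < ·) := by
    have hle : keys.Pairwise (fun a b => (fun x => x) a ≤ (fun x => x) b) :=
      PySem.List.sorted_pairwise _ _
    exact (List.pairwise_and_iff.2 ⟨hle, hnodup⟩).imp (fun h => lt_of_le_of_ne h.1 h.2)
  have hsub : ∀ x ∈ array, x ∈ ([] : List Int) ++ keys := by
    intro x hx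
    simp only [List.nil_append]
    rw [List.Perm.mem_iff hperm, PySem.Set.mem_union]
    exact Or.inl ((PySem.Set.mem_ofList _ _).2 hx)
  have hvalmem : val ∈ ([] : List Int) ++ keys := by
    simp only [List.nil_append]
    rw [List.Perm.mem_iff hperm, PySem.Set.mem_union]
    right; simp
  have := pvFold_inv array target keys [] PySem.Dict.empty hsub (by simpa using hpw)
    (by intro x hx; simp at hx) val hvalmem
  simpa [pvStep] using this.symm
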